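-- pv_equiv track=rewrite | github.com/CDBiddulph/scaffold-learning | scaffolds/human/crossword_concurrent_4/scaffold.py | get_word_positions
-- ===== SOURCE A (Python) =====
-- def find_clue_position(clue_num, grid, direction):
--     """Find the starting position of a clue in the grid based on crossword numbering"""
--     height = len(grid)
--     width = len(grid[0]) if height > 0 else 0
--     current_num = 1
--
--     for row in range(height):
--         for col in range(width):
--             if grid[row][col] == ".":
--                 continue
--
--             starts_across = (
--                 (col == 0 or grid[row][col - 1] == ".")
--                 and col + 1 < width
--                 and grid[row][col + 1] != "."
--             )
--             starts_down = (
--                 (row == 0 or grid[row - 1][col] == ".")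
--                 and row + 1 < height
--                 and grid[row + 1][col] != "."
--             )
--
--             if starts_across or starts_down:
--                 if current_num == clue_num:
--                     return (row, col)
--                 current_num += 1
--
--     return None
--
-- def get_word_positions(clue_num, grid, direction):
--     """Get all grid positions occupied by a word"""
--     pos = find_clue_position(clue_num, grid, direction)
--     if pos is None:
--         return []
--
--     row, col = pos
--     positions = []
--
--     if direction == "across":
--         c = col
--         while c < len(grid[0]) and grid[row][c] != ".":
--             positions.append((row, c))
--             c += 1
--     else:  # down
--         r = row
--         while r < len(grid) and grid[r][col] != ".":
--             positions.append((r, col))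
--             r += 1
--
--     return positions
-- ===== SOURCE B (Python) =====
-- def get_word_positions(clue_num, grid, direction):
--     """Get all grid positions occupied by a word"""
--     height = len(grid)
--     width = len(grid[0]) if height > 0 else 0
--
--     def runs(line):
--         """Maximal runs of consecutive non-'.' entries, as (start, end) pairs, end exclusive."""
--         out = []
--         i, n = 0, len(line)
--         while i < n:
--             if line[i] == ".":
--                 i += 1
--             else:
--                 j = i
--                 while j < n and line[j] != ".":
--                     j += 1
--                 out.append((i, j))
--                 i = j
--         return out
--
--     row_runs = [runs(row[:width]) for row in grid]
--     col_runs = [runs([grid[r][c] for r in range(height)]) for c in range(width)]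
--
--     # A cell is numbered iff it begins a run of length >= 2 (across or down).
--     # Collect numbered cells as flat indices; sorting them yields crossword numbering order.
--     starts = set()
--     for r, rr in enumerate(row_runs):
--         for s, e in rr:
--             if e - s >= 2:
--                 starts.add(r * width + s)
--     for c, cr in enumerate(col_runs):
--         for s, e in cr:
--             if e - s >= 2:
--                 starts.add(s * width + c)
--
--     ordered = sorted(starts)
--     if not 1 <= clue_num <= len(ordered):
--         return []
--     flat = ordered[clue_num - 1]
--     row, col = divmod(flat, width)
--
--     if direction == "across":
--         e = next(e for s, e in row_runs[row] if s <= col < e)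
--         return [(row, c) for c in range(col, e)]
--     else:  # down
--         e = next(e for s, e in col_runs[col] if s <= row < e)
--         return [(r, col) for r in range(row, e)]
-- ===== Notes on version B (the rewrite author's own statement) =====
-- stated objective: alternative
-- what changed: B decomposes the grid into maximal word runs per row and per column, derives the numbered cells as the flat indices r*width+col of run starts of length >= 2 collected in a set and sorted, and returns the tail of the containing run, instead of A's per-cell neighbour-predicate scan with an early-exit counter and a while-loop walk.
-- outside the precondition, e.g. on get_word_positions(1, [['A', 'B'], ['C']], 'across'): A returns [(0, 0), (0, 1)], B raises IndexError
import Mathlib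
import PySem

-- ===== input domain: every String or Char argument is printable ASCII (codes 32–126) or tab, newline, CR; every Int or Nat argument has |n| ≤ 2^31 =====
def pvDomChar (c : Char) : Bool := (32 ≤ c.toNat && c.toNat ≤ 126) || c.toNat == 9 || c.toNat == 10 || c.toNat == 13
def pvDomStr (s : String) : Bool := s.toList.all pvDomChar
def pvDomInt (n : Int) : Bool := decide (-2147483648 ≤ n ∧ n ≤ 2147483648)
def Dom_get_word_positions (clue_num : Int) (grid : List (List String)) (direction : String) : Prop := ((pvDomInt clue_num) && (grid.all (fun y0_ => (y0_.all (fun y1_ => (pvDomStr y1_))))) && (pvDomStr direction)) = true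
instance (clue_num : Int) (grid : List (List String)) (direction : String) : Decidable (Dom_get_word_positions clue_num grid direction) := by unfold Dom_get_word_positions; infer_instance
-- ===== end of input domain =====

-- B replaces A's per-cell neighbour-predicate scan with an early-exit counter and while-loop walk
-- by a run decomposition: maximal word runs per row and per column, numbered cells = run starts of
-- length >= 2 collected as flat indices r*width+col in a set and sorted, and the word = the tail of
-- the containing run. Equal RETURN value proved on grids whose rows are at least as long as row 0
-- (Pre_); objective: alternative algorithm, same cost.

-- Shared transliteration of the cell access grid[r][c] (exact for in-range indices; both Pythons
-- only index in range on inputs admitted by Pre_).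
def cellAt (grid : List (List String)) (r c : Nat) : String := (grid.getD r []).getD c ""

-- ===== PORT A =====
def startsAt (grid : List (List String)) (height width r c : Nat) : Bool :=
  if cellAt grid r c == "." then false
  else
    ((decide (c = 0) || cellAt grid r (c - 1) == ".") && decide (c + 1 < width)
        && !(cellAt grid r (c + 1) == "."))
      || ((decide (r = 0) || cellAt grid (r - 1) c == ".") && decide (r + 1 < height)
        && !(cellAt grid (r + 1) c == "."))

-- row-major list of (row, col) pairs = `for row in range(height): for col in range(width):`
def gridCoords (height width : Nat) : List (Nat × Nat) :=
  (List.range height).flatMap (fun r => (List.range width).map (fun c => (r, c)))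

-- find_clue_position: early-exit scan counting starts until current_num == clue_num
def findAux (clue_num : Int) (grid : List (List String)) (height width : Nat) :
    List (Nat × Nat) → Int → Option (Nat × Nat)
  | [], _ => none
  | (r, c) :: rest, num =>
    if startsAt grid height width r c then
      if num == clue_num then some (r, c)
      else findAux clue_num grid height width rest (num + 1)
    else findAux clue_num grid height width rest num

-- `while c < len(grid[0]) and grid[row][c] != ".": positions.append((row, c)); c += 1`
def walkAcross (grid : List (List String)) (width : Nat) (r c : Nat) : List (Int × Int) :=
  if h : c < width ∧ ¬ cellAt grid r c == "." then
    ((r : Int), (c : Int)) :: walkAcross grid width r (c + 1)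
  else []
termination_by width - c
decreasing_by exact Nat.sub_succ_lt_self width c h.1

-- `while r < len(grid) and grid[r][col] != ".": positions.append((r, col)); r += 1`
def walkDown (grid : List (List String)) (height : Nat) (c r : Nat) : List (Int × Int) :=
  if h : r < height ∧ ¬ cellAt grid r c == "." then
    ((r : Int), (c : Int)) :: walkDown grid height c (r + 1)
  else []
termination_by height - r
decreasing_by exact Nat.sub_succ_lt_self height r h.1

def get_word_positions (clue_num : Int) (grid : List (List String)) (direction : String) : List (Int × Int) :=
  -- height = len(grid); width = len(grid[0]) if height > 0 else 0 (inlined)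
  match findAux clue_num grid grid.length (grid.headD []).length
      (gridCoords grid.length (grid.headD []).length) 1 with
  | none => []
  | some (r, c) =>
    if direction == "across" then walkAcross grid (grid.headD []).length r c
    else walkDown grid grid.length c r

-- ===== PORT B =====
-- inner `while j < n and line[j] != ".": j += 1` of runs(line)
def scanRun (line : List String) (n j : Nat) : Nat :=
  if h : j < n ∧ ¬ line.getD j "" == "." then scanRun line n (j + 1) else j
termination_by n - j
decreasing_by exact Nat.sub_succ_lt_self n j h.1

-- `runs(line)`: maximal runs of consecutive non-'.' entries as (start, end) pairs, end exclusive
def runsAux (line : List String) (n i : Nat) : List (Nat × Nat) :=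
  if h : i < n then
    if hd : line.getD i "" == "." then runsAux line n (i + 1)
    -- max with i+1 is a termination guard only: scanRun line n i ≥ i+1 here (le_scanRun below),
    -- so the recursion continues at scanRun line n i, exactly as in Source B
    else (i, scanRun line n i) :: runsAux line n (max (i + 1) (scanRun line n i))
  else []
termination_by n - i
decreasing_by
· exact Nat.sub_succ_lt_self n i h
· exact Nat.sub_lt_sub_left h
    (Nat.lt_of_lt_of_le (Nat.lt_succ_self i) (Nat.le_max_left (i + 1) (scanRun line n i)))

def runs (line : List String) : List (Nat × Nat) := runsAux line line.length 0

-- `[grid[r][c] for r in range(height)]`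
def colLine (grid : List (List String)) (height c : Nat) : List String :=
  (List.range height).map (fun r => cellAt grid r c)

-- `for idx, rr in enumerate(pairs): for s, e in rr: if e - s >= 2: starts.add(enc(idx, s))`
def addStarts (st : PySem.Set Int) (enc : Int → Nat → Int) (pairs : List (Int × List (Nat × Nat))) : PySem.Set Int :=
  pairs.foldl
    (fun st1 p =>
      p.2.foldl (fun st2 se => if 2 ≤ se.2 - se.1 then PySem.Set.add st2 (enc p.1 se.1) else st2) st1)
    st

def get_word_positions_alt (clue_num : Int) (grid : List (List String)) (direction : String) : List (Int × Int) :=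
  let height := grid.length
  let width := (grid.headD []).length
  let rowRuns := grid.map (fun row => runs (row.take width))          -- row[:width] (exact: nonneg slice)
  let colRuns := (List.range width).map (fun c => runs (colLine grid height c))
  let starts :=
    addStarts
      (addStarts PySem.Set.empty (fun r s => r * (width : Int) + (s : Int)) (PySem.List.enumerate rowRuns))
      (fun c s => (s : Int) * (width : Int) + c) (PySem.List.enumerate colRuns)
  let ordered := PySem.List.sorted starts (fun x => x)
  if 1 ≤ clue_num ∧ clue_num ≤ (ordered.length : Int) then
    let flat := ordered.getD (clue_num - 1).toNat 0                   -- index in range by the guard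
    let row := PySem.Int.floordiv flat (width : Int)
    let col := PySem.Int.mod flat (width : Int)                       -- divmod; width > 0 since ordered ≠ []
    if direction == "across" then
      -- e = next(e for s, e in row_runs[row] if s <= col < e): always found ((row,col) is in a run)
      let e := (((rowRuns.getD row.toNat []).find?
          (fun se => decide ((se.1 : Int) ≤ col) && decide (col < (se.2 : Int)))).getD (0, 0)).2
      (List.range (e - col.toNat)).map (fun (k : Nat) => (row, col + (k : Int)))
    else
      let e := (((colRuns.getD col.toNat []).find?
          (fun se => decide ((se.1 : Int) ≤ row) && decide (row < (se.2 : Int)))).getD (0, 0)).2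
      (List.range (e - row.toNat)).map (fun (k : Nat) => (row + (k : Int), col))
  else []

-- ===== PRECONDITION & SPEC =====
-- Pre_ excludes ragged grids with a row shorter than the first row: Python A raises IndexError on
-- them except when an early exit returns first, and B (which always extracts every full column)
-- raises there.
def Pre_get_word_positions (clue_num : Int) (grid : List (List String)) (direction : String) : Prop :=
  ∀ row ∈ grid, (grid.headD []).length ≤ row.length
instance (clue_num : Int) (grid : List (List String)) (direction : String) : Decidable (Pre_get_word_positions clue_num grid direction) := by unfold Pre_get_word_positions; infer_instance

def pvWitness_get_word_positions : Int × List (List String) × String :=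
  (1, [["A", "B"], ["C", "."]], "across")

def Spec_get_word_positions (clue_num : Int) (grid : List (List String)) (direction : String) (out : List (Int × Int)) : Prop := out = get_word_positions_alt clue_num grid direction
instance (clue_num : Int) (grid : List (List String)) (direction : String) (out : List (Int × Int)) : Decidable (Spec_get_word_positions clue_num grid direction out) := by unfold Spec_get_word_positions; infer_instance

-- ===== CLAIM (what is proved, stated in full; the proofs are below) =====
def Claim_equal_get_word_positions : Prop := ∀ (clue_num : Int) (grid : List (List String)) (direction : String), Dom_get_word_positions clue_num grid direction → Pre_get_word_positions clue_num grid direction → Spec_get_word_positions clue_num grid direction (get_word_positions clue_num grid direction)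

-- ===== LEMMAS AND PROOFS =====

-- A's numbered cells in scan order
def startList (grid : List (List String)) (h w : Nat) : List (Nat × Nat) :=
  (gridCoords h w).filter (fun rc => startsAt grid h w rc.1 rc.2)

-- flat-index encoding used by B
def encFlat (w : Nat) (rc : Nat × Nat) : Int := ((rc.1 * w + rc.2 : Nat) : Int)

-- scanRun never moves left
lemma le_scanRun (line : List String) (n : Nat) : ∀ (fuel j : Nat), n - j ≤ fuel → j ≤ scanRun line n j := by
  intro fuel
  induction fuel with
  | zero =>
    intro j hj
    rw [scanRun]
    split
    · next h => exact absurd h.1 (by omega)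
    · exact le_refl j
  | succ f ih =>
    intro j hj
    rw [scanRun]
    split
    · next h => exact le_trans (by omega) (ih (j + 1) (by omega))
    · exact le_refl j

lemma mem_gridCoords (h w : Nat) (rc : Nat × Nat) :
    rc ∈ gridCoords h w ↔ rc.1 < h ∧ rc.2 < w := by
  obtain ⟨r, c⟩ := rc
  simp only [gridCoords, List.mem_flatMap, List.mem_map, List.mem_range]
  constructor
  · rintro ⟨a, ha, b, hb, h1⟩
    cases h1
    exact ⟨ha, hb⟩
  · rintro ⟨h1, h2⟩
    exact ⟨r, h1, c, h2, rfl⟩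

lemma findAux_eq (clue : Int) (grid : List (List String)) (h w : Nat) :
    ∀ (l : List (Nat × Nat)) (num : Int),
      findAux clue grid h w l num =
        if clue < num then none
        else (l.filter (fun rc => startsAt grid h w rc.1 rc.2))[(clue - num).toNat]? := by
  intro l
  induction l with
  | nil =>
    intro num
    simp [findAux]
  | cons rc rest ih =>
    intro num
    obtain ⟨r, c⟩ := rc
    simp only [findAux, List.filter_cons]
    by_cases hs : startsAt grid h w r c
    · simp only [hs, if_true]
      by_cases he : num = clue
      · subst he
        rw [if_pos (by simp), if_neg (by omega)]
        simp
      · rw [if_neg (by simpa using he), ih (num + 1)]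
        by_cases h1 : clue < num
        · rw [if_pos (by omega), if_pos h1]
        · by_cases h2 : clue = num
          · exact absurd h2.symm he
          · rw [if_neg (by omega), if_neg h1,
              (by omega : (clue - num).toNat = (clue - (num + 1)).toNat + 1)]
            simp
    · simp only [hs, if_false, Bool.false_eq_true, ih num]

lemma scanRun_interior (line : List String) (n : Nat) :
    ∀ (fuel j : Nat), n - j ≤ fuel → ∀ k, j ≤ k → k < scanRun line n j →
      k < n ∧ ¬ line.getD k "" == "." := by
  intro fuel
  induction fuel with
  | zero =>
    intro j hj k hk1 hk2
    rw [scanRun] at hk2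
    split at hk2
    · next h => exact absurd h.1 (by omega)
    · omega
  | succ f ih =>
    intro j hj k hk1 hk2
    rw [scanRun] at hk2
    split at hk2
    · next h =>
      by_cases hkj : k = j
      · exact hkj ▸ h
      · exact ih (j + 1) (by omega) k (by omega) hk2
    · omega

lemma scanRun_stable (line : List String) (n : Nat) :
    ∀ (fuel j : Nat), n - j ≤ fuel → ∀ c, j ≤ c → c < scanRun line n j →
      scanRun line n c = scanRun line n j := by
  intro fuel
  induction fuel with
  | zero =>
    intro j hj c hc1 hc2
    rw [scanRun] at hc2
    split at hc2
    · next h => exact absurd h.1 (by omega)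
    · omega
  | succ f ih =>
    intro j hj c hc1 hc2
    by_cases h : j < n ∧ ¬ line.getD j "" == "."
    · have hj_eq : scanRun line n j = scanRun line n (j + 1) := by
        rw [scanRun, dif_pos h]
      rw [hj_eq] at hc2 ⊢
      by_cases hcj : c = j
      · subst hcj
        rw [scanRun, dif_pos h]
      · exact ih (j + 1) (by omega) c (by omega) hc2
    · rw [scanRun, dif_neg h] at hc2
      omega

lemma scanRun_stop (line : List String) (n : Nat) :
    ∀ (fuel j : Nat), n - j ≤ fuel → scanRun line n j < n →
      line.getD (scanRun line n j) "" == "." := by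
  intro fuel
  induction fuel with
  | zero =>
    intro j hj hlt
    rw [scanRun] at hlt ⊢
    split at hlt
    · next h => exact absurd h.1 (by omega)
    · next h =>
      rw [dif_neg h]
      by_cases h2 : line.getD j "" == "."
      · exact h2
      · exact absurd ⟨hlt, h2⟩ h
  | succ f ih =>
    intro j hj hlt
    rw [scanRun] at hlt ⊢
    split at hlt
    · next h =>
      rw [dif_pos h]
      exact ih (j + 1) (by omega) hlt
    · next h =>
      rw [dif_neg h]
      by_cases h2 : line.getD j "" == "."
      · exact h2
      · exact absurd ⟨hlt, h2⟩ h

lemma scanRun_two (line : List String) (n s : Nat) (hs : s < n) (hd : ¬ line.getD s "" == ".") :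
    s + 2 ≤ scanRun line n s ↔ s + 1 < n ∧ ¬ line.getD (s + 1) "" == "." := by
  have hs1 : scanRun line n s = scanRun line n (s + 1) := by
    rw [scanRun, dif_pos ⟨hs, hd⟩]
  rw [hs1]
  constructor
  · intro h2
    by_contra hc
    have : ¬ (s + 1 < n ∧ ¬ line.getD (s + 1) "" == ".") := by tauto
    rw [scanRun, dif_neg this] at h2
    omega
  · intro ⟨h1, h2⟩
    rw [scanRun, dif_pos ⟨h1, h2⟩]
    exact le_scanRun line n (n - (s + 2)) (s + 2) (le_refl _)

lemma mem_runsAux_iff (line : List String) (n : Nat) :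
    ∀ (fuel i : Nat), n - i ≤ fuel → ∀ s e,
      ((s, e) ∈ runsAux line n i ↔
        i ≤ s ∧ s < n ∧ ¬ line.getD s "" == "." ∧ (s = i ∨ line.getD (s - 1) "" == ".") ∧
          e = scanRun line n s) := by
  intro fuel
  induction fuel with
  | zero =>
    intro i hi s e
    rw [runsAux, dif_neg (by omega : ¬ i < n)]
    simp only [List.not_mem_nil, false_iff]
    rintro ⟨h1, h2, -⟩
    omega
  | succ f ih =>
    intro i hi s e
    rw [runsAux]
    by_cases hin : i < n
    · rw [dif_pos hin]
      by_cases hd : line.getD i "" == "."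
      · rw [dif_pos hd, ih (i + 1) (by omega) s e]
        constructor
        · rintro ⟨h1, h2, h3, h4, h5⟩
          refine ⟨by omega, h2, h3, ?_, h5⟩
          rcases h4 with h4 | h4
          · right; subst h4; simpa using hd
          · right; exact h4
        · rintro ⟨h1, h2, h3, h4, h5⟩
          have hsi : s ≠ i := by rintro rfl; exact h3 hd
          refine ⟨by omega, h2, h3, ?_, h5⟩
          rcases h4 with h4 | h4
          · exact absurd h4 hsi
          · right; exact h4
      · rw [dif_neg hd]
        have hij : i + 1 ≤ scanRun line n i := by
          rw [scanRun, dif_pos ⟨hin, hd⟩]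
          exact le_scanRun line n (n - (i + 1)) (i + 1) (le_refl _)
        have hjstop : scanRun line n i < n → line.getD (scanRun line n i) "" == "." :=
          scanRun_stop line n (n - i) i (le_refl _)
        rw [Nat.max_eq_right hij, List.mem_cons, ih (scanRun line n i) (by omega) s e]
        constructor
        · rintro (heq | ⟨h1, h2, h3, h4, h5⟩)
          · injection heq with e1 e2
            subst e1; subst e2
            exact ⟨le_refl _, hin, (by simpa using hd), Or.inl rfl, rfl⟩
          · have hsne : s ≠ scanRun line n i := by rintro rfl; exact h3 (hjstop h2)
            have hdot : line.getD (s - 1) "" == "." := by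
              rcases h4 with h4 | h4
              · exact absurd h4 hsne
              · exact h4
            exact ⟨by omega, h2, h3, Or.inr hdot, h5⟩
        · rintro ⟨h1, h2, h3, h4, h5⟩
          by_cases hsi : s = i
          · left
            subst hsi
            rw [Prod.mk.injEq]
            exact ⟨rfl, h5⟩
          · right
            have hdot : line.getD (s - 1) "" == "." := by
              rcases h4 with h4 | h4
              · exact absurd h4 hsi
              · exact h4
            have hjs : scanRun line n i ≤ s := by
              by_contra hc
              push Not at hc
              have h6 := scanRun_interior line n (n - i) i (le_refl _) (s - 1) (by omega) (by omega)
              exact h6.2 hdot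
            exact ⟨hjs, h2, h3, Or.inr hdot, h5⟩
    · rw [dif_neg hin]
      simp only [List.not_mem_nil, false_iff]
      rintro ⟨h1, h2, -⟩
      omega

lemma mem_runs_iff (line : List String) (s e : Nat) :
    (s, e) ∈ runs line ↔
      s < line.length ∧ ¬ line.getD s "" == "." ∧ (s = 0 ∨ line.getD (s - 1) "" == ".") ∧
        e = scanRun line line.length s := by
  rw [runs, mem_runsAux_iff line line.length line.length 0 (by omega) s e]
  constructor
  · rintro ⟨-, h2, h3, h4, h5⟩
    exact ⟨h2, h3, h4, h5⟩
  · rintro ⟨h2, h3, h4, h5⟩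
    exact ⟨Nat.zero_le _, h2, h3, h4, h5⟩

-- a run start of length ≥ 2 is exactly A's directional start predicate on that line
lemma start_run_iff (line : List String) (s : Nat) :
    (∃ e, (s, e) ∈ runs line ∧ 2 ≤ e - s) ↔
      s < line.length ∧ ¬ line.getD s "" == "." ∧ (s = 0 ∨ line.getD (s - 1) "" == ".") ∧
        s + 1 < line.length ∧ ¬ line.getD (s + 1) "" == "." := by
  constructor
  · rintro ⟨e, hmem, h2⟩
    rw [mem_runs_iff] at hmem
    obtain ⟨h1, hd, hb, he⟩ := hmem
    have h3 := (scanRun_two line line.length s h1 hd).mp (by omega)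
    exact ⟨h1, hd, hb, h3.1, h3.2⟩
  · rintro ⟨h1, hd, hb, h2, h3⟩
    refine ⟨scanRun line line.length s, ?_, ?_⟩
    · rw [mem_runs_iff]
      exact ⟨h1, hd, hb, rfl⟩
    · have h4 := (scanRun_two line line.length s h1 hd).mpr ⟨h2, h3⟩
      omega

lemma runs_find (line : List String) (n : Nat) (hn : n = line.length) :
    ∀ (fuel i c : Nat), n - i ≤ fuel → i ≤ c → c < n → ¬ line.getD c "" == "." →
      ∃ s, (runsAux line n i).find?
          (fun se => decide ((se.1 : Int) ≤ (c : Int)) && decide ((c : Int) < (se.2 : Int)))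
        = some (s, scanRun line n c) := by
  intro fuel
  induction fuel with
  | zero =>
    intro i c hf hic hcn hcd
    omega
  | succ f ih =>
    intro i c hf hic hcn hcd
    rw [runsAux, dif_pos (by omega : i < n)]
    by_cases hd : line.getD i "" == "."
    · rw [dif_pos hd]
      have hne : i ≠ c := by rintro rfl; exact hcd hd
      exact ih (i + 1) c (by omega) (by omega) hcn hcd
    · rw [dif_neg hd]
      have hij : i + 1 ≤ scanRun line n i := by
        rw [scanRun, dif_pos ⟨(by omega : i < n), hd⟩]
        exact le_scanRun line n (n - (i + 1)) (i + 1) (le_refl _)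
      rw [Nat.max_eq_right hij]
      by_cases hcj : c < scanRun line n i
      · refine ⟨i, ?_⟩
        rw [List.find?_cons_of_pos (by simp; omega)]
        rw [scanRun_stable line n (n - i) i (le_refl _) c hic hcj]
      · rw [List.find?_cons_of_neg (by simp; omega)]
        exact ih (scanRun line n i) c (by omega) (by omega) hcn hcd

lemma mem_inner_fold (g : Nat → Int) (l : List (Nat × Nat)) :
    ∀ (st : PySem.Set Int) (v : Int),
      (v ∈ l.foldl (fun st2 se => if 2 ≤ se.2 - se.1 then PySem.Set.add st2 (g se.1) else st2) st ↔
        v ∈ st ∨ ∃ se ∈ l, 2 ≤ se.2 - se.1 ∧ v = g se.1) := by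
  induction l with
  | nil => intro st v; simp
  | cons se rest ih =>
    intro st v
    simp only [List.foldl_cons]
    rw [ih]
    by_cases h2 : 2 ≤ se.2 - se.1
    · rw [if_pos h2, PySem.Set.mem_add]
      simp only [List.mem_cons]
      constructor
      · rintro ((h | h) | ⟨x, hx, hx2, hx3⟩)
        · left; exact h
        · right; exact ⟨se, Or.inl rfl, h2, h⟩
        · right; exact ⟨x, Or.inr hx, hx2, hx3⟩
      · rintro (h | ⟨x, hx | hx, hx2, hx3⟩)
        · left; left; exact h
        · left; right; exact hx ▸ hx3
        · right; exact ⟨x, hx, hx2, hx3⟩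
    · rw [if_neg h2]
      simp only [List.mem_cons]
      constructor
      · rintro (h | ⟨x, hx, hx2, hx3⟩)
        · left; exact h
        · right; exact ⟨x, Or.inr hx, hx2, hx3⟩
      · rintro (h | ⟨x, hx | hx, hx2, hx3⟩)
        · left; exact h
        · exact absurd (hx ▸ hx2) h2
        · right; exact ⟨x, hx, hx2, hx3⟩

lemma mem_addStarts (enc : Int → Nat → Int) (pairs : List (Int × List (Nat × Nat))) :
    ∀ (st : PySem.Set Int) (v : Int),
      (v ∈ addStarts st enc pairs ↔
        v ∈ st ∨ ∃ p ∈ pairs, ∃ se ∈ p.2, 2 ≤ se.2 - se.1 ∧ v = enc p.1 se.1) := by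
  induction pairs with
  | nil => intro st v; simp [addStarts]
  | cons p rest ih =>
    intro st v
    rw [show addStarts st enc (p :: rest)
        = addStarts (p.2.foldl (fun st2 se => if 2 ≤ se.2 - se.1 then PySem.Set.add st2 (enc p.1 se.1) else st2) st) enc rest from rfl]
    rw [ih, mem_inner_fold]
    simp only [List.mem_cons]
    constructor
    · rintro ((h | ⟨se, hse, h2, h3⟩) | ⟨q, hq, se, hse, h2, h3⟩)
      · left; exact h
      · right; exact ⟨p, Or.inl rfl, se, hse, h2, h3⟩
      · right; exact ⟨q, Or.inr hq, se, hse, h2, h3⟩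
    · rintro (h | ⟨q, rfl | hq, se, hse, h2, h3⟩)
      · left; left; exact h
      · left; right; exact ⟨se, hse, h2, h3⟩
      · right; exact ⟨q, hq, se, hse, h2, h3⟩

lemma nodup_inner_fold (g : Nat → Int) (l : List (Nat × Nat)) :
    ∀ (st : PySem.Set Int), st.Nodup →
      (l.foldl (fun st2 se => if 2 ≤ se.2 - se.1 then PySem.Set.add st2 (g se.1) else st2) st).Nodup := by
  induction l with
  | nil => intro st h; simpa using h
  | cons se rest ih =>
    intro st h
    simp only [List.foldl_cons]
    apply ih
    by_cases h2 : 2 ≤ se.2 - se.1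
    · rw [if_pos h2]
      exact PySem.Set.nodup_add _ _ h
    · rw [if_neg h2]
      exact h

lemma nodup_addStarts (enc : Int → Nat → Int) (pairs : List (Int × List (Nat × Nat))) :
    ∀ (st : PySem.Set Int), st.Nodup → (addStarts st enc pairs).Nodup := by
  induction pairs with
  | nil => intro st h; simpa [addStarts] using h
  | cons p rest ih =>
    intro st h
    rw [show addStarts st enc (p :: rest)
        = addStarts (p.2.foldl (fun st2 se => if 2 ≤ se.2 - se.1 then PySem.Set.add st2 (enc p.1 se.1) else st2) st) enc rest from rfl]
    exact ih _ (nodup_inner_fold _ _ st h)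

lemma pairwise_enc_gridCoords (h w : Nat) :
    (gridCoords h w).Pairwise (fun a b => encFlat w a < encFlat w b) := by
  induction h with
  | zero => simp [gridCoords]
  | succ h ih =>
    have hsplit : gridCoords (h + 1) w = gridCoords h w ++ (List.range w).map (fun c => (h, c)) := by
      simp [gridCoords, List.range_succ]
    rw [hsplit, List.pairwise_append]
    refine ⟨ih, ?_, ?_⟩
    · rw [List.pairwise_map]
      refine List.Pairwise.imp ?_ List.pairwise_lt_range
      intro a b hab
      simp only [encFlat, Nat.cast_lt]
      omega
    · intro a ha b hb
      obtain ⟨hah, haw⟩ := (mem_gridCoords h w a).mp ha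
      obtain ⟨c, hc, rfl⟩ := List.mem_map.mp hb
      have hcw := List.mem_range.mp hc
      simp only [encFlat, Nat.cast_lt]
      calc a.1 * w + a.2 < a.1 * w + w := by omega
        _ = (a.1 + 1) * w := by ring
        _ ≤ h * w := Nat.mul_le_mul_right w hah
        _ ≤ h * w + c := Nat.le_add_right _ _

lemma pairwise_enc_startList (grid : List (List String)) (h w : Nat) :
    ((startList grid h w).map (encFlat w)).Pairwise (· < ·) := by
  unfold startList
  rw [List.pairwise_map]
  exact List.Pairwise.sublist List.filter_sublist (pairwise_enc_gridCoords h w)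


lemma getD_take (l : List String) (w k : Nat) (hk : k < w) :
    (l.take w).getD k "" = l.getD k "" := by
  rcases Nat.lt_or_ge k l.length with h | h
  · rw [List.getD_eq_getElem _ _ (by simp [List.length_take]; omega),
      List.getD_eq_getElem _ _ h]
    simp [List.getElem_take]
  · rw [List.getD_eq_default _ _ (by simp [List.length_take]; omega),
      List.getD_eq_default _ _ h]

lemma getD_map_lt {α β : Type} (f : α → β) (l : List α) (r : Nat) (d : β) (h : r < l.length) :
    (l.map f).getD r d = f (l[r]) := by
  rw [List.getD_eq_getElem _ _ (by simpa using h)]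
  simp

lemma walkAcross_eq (grid : List (List String)) (w r : Nat) (line : List String)
    (hag : ∀ k, k < w → line.getD k "" = cellAt grid r k) :
    ∀ (fuel c : Nat), w - c ≤ fuel →
      walkAcross grid w r c
        = (List.range (scanRun line w c - c)).map (fun k => ((r : Int), ((c + k : Nat) : Int))) := by
  intro fuel
  induction fuel with
  | zero =>
    intro c hc
    rw [walkAcross, dif_neg (by rintro ⟨h1, -⟩; omega)]
    rw [scanRun, dif_neg (by rintro ⟨h1, -⟩; omega)]
    simp
  | succ f ih =>
    intro c hc
    rw [walkAcross]
    by_cases hg : c < w ∧ ¬ cellAt grid r c == "."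
    · rw [dif_pos hg]
      have hline : ¬ line.getD c "" == "." := by rw [hag c hg.1]; exact hg.2
      have hsc : scanRun line w c = scanRun line w (c + 1) := by
        rw [scanRun, dif_pos ⟨hg.1, hline⟩]
      have hge : c + 1 ≤ scanRun line w (c + 1) :=
        le_scanRun line w (w - (c + 1)) (c + 1) (le_refl _)
      rw [ih (c + 1) (by omega), hsc]
      rw [(by omega : scanRun line w (c + 1) - c = (scanRun line w (c + 1) - (c + 1)) + 1),
        List.range_succ_eq_map]
      simp only [List.map_cons, List.map_map, Nat.add_zero]
      refine congrArg (List.cons _) ?_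
      congr 1
      funext k
      simp only [Function.comp_apply]
      congr 2
      omega
    · rw [dif_neg hg]
      have hstop : scanRun line w c = c := by
        rw [scanRun, dif_neg (by
          rintro ⟨h1, h2⟩
          exact hg ⟨h1, by rwa [hag c h1] at h2⟩)]
      rw [hstop]
      simp

lemma walkDown_eq (grid : List (List String)) (h c : Nat) (line : List String)
    (hag : ∀ k, k < h → line.getD k "" = cellAt grid k c) :
    ∀ (fuel r : Nat), h - r ≤ fuel →
      walkDown grid h c r
        = (List.range (scanRun line h r - r)).map (fun k => (((r + k : Nat) : Int), (c : Int))) := by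
  intro fuel
  induction fuel with
  | zero =>
    intro r hr
    rw [walkDown, dif_neg (by rintro ⟨h1, -⟩; omega)]
    rw [scanRun, dif_neg (by rintro ⟨h1, -⟩; omega)]
    simp
  | succ f ih =>
    intro r hr
    rw [walkDown]
    by_cases hg : r < h ∧ ¬ cellAt grid r c == "."
    · rw [dif_pos hg]
      have hline : ¬ line.getD r "" == "." := by rw [hag r hg.1]; exact hg.2
      have hsc : scanRun line h r = scanRun line h (r + 1) := by
        rw [scanRun, dif_pos ⟨hg.1, hline⟩]
      have hge : r + 1 ≤ scanRun line h (r + 1) :=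
        le_scanRun line h (h - (r + 1)) (r + 1) (le_refl _)
      rw [ih (r + 1) (by omega), hsc]
      rw [(by omega : scanRun line h (r + 1) - r = (scanRun line h (r + 1) - (r + 1)) + 1),
        List.range_succ_eq_map]
      simp only [List.map_cons, List.map_map, Nat.add_zero]
      refine congrArg (List.cons _) ?_
      congr 1
      funext k
      simp only [Function.comp_apply]
      congr 2
      omega
    · rw [dif_neg hg]
      have hstop : scanRun line h r = r := by
        rw [scanRun, dif_neg (by
          rintro ⟨h1, h2⟩
          exact hg ⟨h1, by rwa [hag r h1] at h2⟩)]
      rw [hstop]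
      simp

lemma startsAt_iff (grid : List (List String)) (h w r c : Nat) :
    startsAt grid h w r c = true ↔
      ¬ cellAt grid r c == "." ∧
        (((c = 0 ∨ cellAt grid r (c - 1) == ".") ∧ c + 1 < w ∧ ¬ cellAt grid r (c + 1) == ".") ∨
         ((r = 0 ∨ cellAt grid (r - 1) c == ".") ∧ r + 1 < h ∧ ¬ cellAt grid (r + 1) c == ".")) := by
  unfold startsAt
  by_cases hd : cellAt grid r c == "."
  · simp [hd]
  · rw [if_neg hd]
    rw [Bool.not_eq_true] at hd
    simp only [Bool.or_eq_true, Bool.and_eq_true, Bool.not_eq_true', Bool.not_eq_true,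
      decide_eq_true_eq]
    tauto

lemma startsAt_nondot (grid : List (List String)) (h w r c : Nat)
    (hs : startsAt grid h w r c = true) : ¬ cellAt grid r c == "." :=
  ((startsAt_iff grid h w r c).mp hs).1

lemma row_start_iff (grid : List (List String))
    (hpre : ∀ row ∈ grid, (grid.headD []).length ≤ row.length)
    (r : Nat) (hr : r < grid.length) (s : Nat) :
    (∃ e, (s, e) ∈ runs ((grid[r]).take (grid.headD []).length) ∧ 2 ≤ e - s) ↔
      (s < (grid.headD []).length ∧ ¬ cellAt grid r s == "." ∧
        (s = 0 ∨ cellAt grid r (s - 1) == ".") ∧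
        s + 1 < (grid.headD []).length ∧ ¬ cellAt grid r (s + 1) == ".") := by
  have hw : ((grid[r]).take (grid.headD []).length).length = (grid.headD []).length := by
    have := hpre (grid[r]) (List.getElem_mem hr)
    rw [List.length_take]
    omega
  have hbr : ∀ k, k < (grid.headD []).length →
      ((grid[r]).take (grid.headD []).length).getD k "" = cellAt grid r k := by
    intro k hk
    rw [getD_take _ _ _ hk, cellAt, List.getD_eq_getElem _ _ hr]
  rw [start_run_iff, hw]
  constructor
  · rintro ⟨h1, h2, h3, h4, h5⟩
    refine ⟨h1, by rwa [hbr s h1] at h2, ?_, h4, by rwa [hbr (s + 1) h4] at h5⟩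
    rcases h3 with h3 | h3
    · exact Or.inl h3
    · exact Or.inr (by rwa [hbr (s - 1) (by omega)] at h3)
  · rintro ⟨h1, h2, h3, h4, h5⟩
    refine ⟨h1, by rwa [hbr s h1], ?_, h4, by rwa [hbr (s + 1) h4]⟩
    rcases h3 with h3 | h3
    · exact Or.inl h3
    · exact Or.inr (by rwa [hbr (s - 1) (by omega)])

lemma col_start_iff (grid : List (List String)) (c s : Nat) :
    (∃ e, (s, e) ∈ runs (colLine grid grid.length c) ∧ 2 ≤ e - s) ↔
      (s < grid.length ∧ ¬ cellAt grid s c == "." ∧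
        (s = 0 ∨ cellAt grid (s - 1) c == ".") ∧
        s + 1 < grid.length ∧ ¬ cellAt grid (s + 1) c == ".") := by
  have hh : (colLine grid grid.length c).length = grid.length := by simp [colLine]
  have hbc : ∀ k, k < grid.length → (colLine grid grid.length c).getD k "" = cellAt grid k c := by
    intro k hk
    exact PySem.List.getD_map_range _ _ _ _ hk
  rw [start_run_iff, hh]
  constructor
  · rintro ⟨h1, h2, h3, h4, h5⟩
    refine ⟨h1, by rwa [hbc s h1] at h2, ?_, h4, by rwa [hbc (s + 1) h4] at h5⟩
    rcases h3 with h3 | h3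
    · exact Or.inl h3
    · exact Or.inr (by rwa [hbc (s - 1) (by omega)] at h3)
  · rintro ⟨h1, h2, h3, h4, h5⟩
    refine ⟨h1, by rwa [hbc s h1], ?_, h4, by rwa [hbc (s + 1) h4]⟩
    rcases h3 with h3 | h3
    · exact Or.inl h3
    · exact Or.inr (by rwa [hbc (s - 1) (by omega)])

lemma mem_starts_iff (grid : List (List String))
    (hpre : ∀ row ∈ grid, (grid.headD []).length ≤ row.length) (v : Int) :
    (v ∈ addStarts
        (addStarts PySem.Set.empty
          (fun r s => r * ((grid.headD []).length : Int) + (s : Int))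
          (PySem.List.enumerate (grid.map (fun row => runs (row.take (grid.headD []).length)))))
        (fun c s => (s : Int) * ((grid.headD []).length : Int) + c)
        (PySem.List.enumerate
          ((List.range (grid.headD []).length).map (fun c => runs (colLine grid grid.length c))))) ↔
      ∃ rc ∈ startList grid grid.length (grid.headD []).length,
        v = encFlat (grid.headD []).length rc := by
  rw [mem_addStarts, mem_addStarts]
  have hempty : ¬ v ∈ (PySem.Set.empty : PySem.Set Int) := List.not_mem_nil
  constructor
  · rintro ((h | ⟨p, hp, se, hse, h2, h3⟩) | ⟨p, hp, se, hse, h2, h3⟩)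
    · exact absurd h hempty
    · -- across start at (r, se.1)
      obtain ⟨k, hk, rfl⟩ := (PySem.List.mem_enumerate_iff _ _ _).mp hp
      have hk' : k < grid.length := by simpa using hk
      have hrow := (row_start_iff grid hpre k hk' se.1).mp
        ⟨se.2, by simpa using hse, h2⟩
      refine ⟨(k, se.1), ?_, ?_⟩
      · rw [startList, List.mem_filter]
        refine ⟨(mem_gridCoords _ _ _).mpr ⟨hk', hrow.1⟩, ?_⟩
        rw [startsAt_iff]
        exact ⟨hrow.2.1, Or.inl ⟨hrow.2.2.1, hrow.2.2.2.1, hrow.2.2.2.2⟩⟩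
      · rw [h3, encFlat]
        push_cast
        ring
    · -- down start at (se.1, c)
      obtain ⟨k, hk, rfl⟩ := (PySem.List.mem_enumerate_iff _ _ _).mp hp
      have hk' : k < (grid.headD []).length := by simpa using hk
      have hcol := (col_start_iff grid k se.1).mp ⟨se.2, by simpa using hse, h2⟩
      refine ⟨(se.1, k), ?_, ?_⟩
      · rw [startList, List.mem_filter]
        refine ⟨(mem_gridCoords _ _ _).mpr ⟨hcol.1, hk'⟩, ?_⟩
        rw [startsAt_iff]
        exact ⟨hcol.2.1, Or.inr ⟨hcol.2.2.1, hcol.2.2.2.1, hcol.2.2.2.2⟩⟩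
      · rw [h3, encFlat]
        push_cast
        ring
  · rintro ⟨⟨r, c⟩, hmem, hv⟩
    rw [startList, List.mem_filter] at hmem
    obtain ⟨hco, hst⟩ := hmem
    obtain ⟨hrh, hcw⟩ := (mem_gridCoords _ _ _).mp hco
    rw [startsAt_iff] at hst
    rcases hst.2 with hAC | hDN
    · left; right
      refine ⟨((r : Int), runs ((grid[r]).take (grid.headD []).length)), ?_, ?_⟩
      · rw [PySem.List.mem_enumerate_iff]
        exact ⟨r, by simpa using hrh, by simp⟩
      · obtain ⟨e, he, he2⟩ := (row_start_iff grid hpre r hrh c).mpr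
          ⟨hcw, hst.1, hAC.1, hAC.2.1, hAC.2.2⟩
        refine ⟨(c, e), he, he2, ?_⟩
        rw [hv, encFlat]
        push_cast
        ring
    · right
      refine ⟨((c : Int), runs (colLine grid grid.length c)), ?_, ?_⟩
      · rw [PySem.List.mem_enumerate_iff]
        refine ⟨c, by simpa using hcw, by simp⟩
      · obtain ⟨e, he, he2⟩ := (col_start_iff grid c r).mpr
          ⟨hrh, hst.1, hDN.1, hDN.2.1, hDN.2.2⟩
        refine ⟨(r, e), he, he2, ?_⟩
        rw [hv, encFlat]
        push_cast
        ring

lemma ordered_eq (grid : List (List String))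
    (hpre : ∀ row ∈ grid, (grid.headD []).length ≤ row.length) :
    PySem.List.sorted
        (addStarts
          (addStarts PySem.Set.empty
            (fun r s => r * ((grid.headD []).length : Int) + (s : Int))
            (PySem.List.enumerate (grid.map (fun row => runs (row.take (grid.headD []).length)))))
          (fun c s => (s : Int) * ((grid.headD []).length : Int) + c)
          (PySem.List.enumerate
            ((List.range (grid.headD []).length).map (fun c => runs (colLine grid grid.length c)))))
        (fun x => x)
      = (startList grid grid.length (grid.headD []).length).map (encFlat (grid.headD []).length) := by
  apply PySem.List.sorted_eq_of_perm_of_pairwise_lt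
  · rw [List.perm_ext_iff_of_nodup]
    · intro a
      rw [mem_starts_iff grid hpre a, List.mem_map]
      constructor
      · rintro ⟨rc, h1, h2⟩; exact ⟨rc, h1, h2.symm⟩
      · rintro ⟨rc, h1, h2⟩; exact ⟨rc, h1, h2.symm⟩
    · exact (pairwise_enc_startList grid _ _).imp ne_of_lt
    · exact nodup_addStarts _ _ _ (nodup_addStarts _ _ _ List.nodup_nil)
  · exact pairwise_enc_startList grid _ _

-- ===== VERDICT (by name: the statement is the Claim_ definition above) =====
theorem get_word_positions_spec : Claim_equal_get_word_positions := by
  intro clue grid direction _ hpre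
  unfold Spec_get_word_positions
  simp only [get_word_positions, get_word_positions_alt]
  rw [findAux_eq]
  rw [show ((gridCoords grid.length (grid.headD []).length).filter
      (fun rc => startsAt grid grid.length (grid.headD []).length rc.1 rc.2))
      = startList grid grid.length (grid.headD []).length from rfl]
  rw [ordered_eq grid hpre]
  by_cases h1 : clue < 1
  · rw [if_pos h1, if_neg (by rintro ⟨ha, -⟩; omega)]
  · rw [if_neg h1]
    cases hk : (startList grid grid.length (grid.headD []).length)[(clue - 1).toNat]? with
    | none =>
      rw [List.getElem?_eq_none_iff] at hk
      rw [if_neg (by rw [List.length_map]; rintro ⟨ha, hb⟩; omega)]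
    | some rc =>
      obtain ⟨r, c⟩ := rc
      obtain ⟨hlt, heq⟩ := List.getElem?_eq_some_iff.mp hk
      have hmem : (r, c) ∈ startList grid grid.length (grid.headD []).length :=
        heq ▸ List.getElem_mem hlt
      rw [startList, List.mem_filter] at hmem
      obtain ⟨hco, hst⟩ := hmem
      obtain ⟨hrh, hcw⟩ := (mem_gridCoords _ _ _).mp hco
      have hw0 : 0 < (grid.headD []).length := by omega
      have hnd : ¬ cellAt grid r c == "." := startsAt_nondot _ _ _ _ _ hst
      rw [if_pos (by rw [List.length_map]; omega)]
      have hflat : ((startList grid grid.length (grid.headD []).length).map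
            (encFlat (grid.headD []).length)).getD (clue - 1).toNat 0
          = encFlat (grid.headD []).length (r, c) := by
        rw [List.getD_eq_getElem _ _ (by rw [List.length_map]; exact hlt),
          List.getElem_map, heq]
      rw [hflat]
      have hrow : PySem.Int.floordiv (encFlat (grid.headD []).length (r, c))
          ((grid.headD []).length : Int) = (r : Int) := by
        rw [encFlat, PySem.Int.floordiv_natCast]
        congr 1
        rw [Nat.mul_comm, Nat.mul_add_div hw0, Nat.div_eq_of_lt hcw, Nat.add_zero]
      have hcol : PySem.Int.mod (encFlat (grid.headD []).length (r, c))
          ((grid.headD []).length : Int) = (c : Int) := by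
        rw [encFlat, PySem.Int.mod_natCast]
        congr 1
        rw [Nat.mul_comm, Nat.mul_add_mod, Nat.mod_eq_of_lt hcw]
      rw [hrow, hcol, Int.toNat_natCast, Int.toNat_natCast]
      show (if direction == "across" then walkAcross grid (grid.headD []).length r c
        else walkDown grid grid.length c r) = _
      by_cases hdir : direction == "across"
      · rw [if_pos hdir, if_pos hdir]
        -- row line facts
        have hlen : ((grid[r]).take (grid.headD []).length).length = (grid.headD []).length := by
          have := hpre (grid[r]) (List.getElem_mem hrh)
          rw [List.length_take]
          omega
        have hbr : ∀ k, k < (grid.headD []).length →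
            ((grid[r]).take (grid.headD []).length).getD k "" = cellAt grid r k := by
          intro k hkk
          rw [getD_take _ _ _ hkk, cellAt, List.getD_eq_getElem _ _ hrh]
        have hget : (grid.map (fun row => runs (row.take (grid.headD []).length))).getD r []
            = runs ((grid[r]).take (grid.headD []).length) :=
          getD_map_lt _ _ _ _ hrh
        have hruns : runs ((grid[r]).take (grid.headD []).length)
            = runsAux ((grid[r]).take (grid.headD []).length) (grid.headD []).length 0 := by
          rw [runs, hlen]
        obtain ⟨s, hfind⟩ := runs_find ((grid[r]).take (grid.headD []).length)
          (grid.headD []).length hlen.symm (grid.headD []).length 0 c (by omega) (Nat.zero_le _)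
          hcw (by rw [hbr c hcw]; exact hnd)
        rw [hget, hruns, hfind]
        rw [walkAcross_eq grid (grid.headD []).length r ((grid[r]).take (grid.headD []).length)
          hbr ((grid.headD []).length - c) c (le_refl _)]
        exact List.map_congr_left (fun k _ => by simp)
      · rw [if_neg hdir, if_neg hdir]
        have hlen : (colLine grid grid.length c).length = grid.length := by simp [colLine]
        have hbc : ∀ k, k < grid.length → (colLine grid grid.length c).getD k "" = cellAt grid k c := by
          intro k hkk
          exact PySem.List.getD_map_range _ _ _ _ hkk
        have hget : ((List.range (grid.headD []).length).map
              (fun c2 => runs (colLine grid grid.length c2))).getD c []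
            = runs (colLine grid grid.length c) := by
          rw [getD_map_lt _ _ _ _ (by simpa using hcw)]
          simp
        have hruns : runs (colLine grid grid.length c)
            = runsAux (colLine grid grid.length c) grid.length 0 := by
          rw [runs, hlen]
        obtain ⟨s, hfind⟩ := runs_find (colLine grid grid.length c) grid.length hlen.symm
          grid.length 0 r (by omega) (Nat.zero_le _) hrh (by rw [hbc r hrh]; exact hnd)
        rw [hget, hruns, hfind]
        rw [walkDown_eq grid grid.length c (colLine grid grid.length c) hbc
          (grid.length - r) r (le_refl _)]
        exact List.map_congr_left (fun k _ => by simp)
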